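-- pv_equiv track=rewrite | github.com/evgenydarkhanov/algorithms-and-data-structures | tasks/096_max_prod_subsequence.py | max_prod_subsequence
-- ===== SOURCE A (Python) =====
-- def max_prod_subsequence(arr: list, k: int) -> int:
-- 	if k == 1:
-- 		return max(arr)
--
-- 	n = len(arr)
-- 	if k > n or k <= 0:
-- 		return 0
--
-- 	max_prod = 1
-- 	for i in range(n - k + 1):
-- 		prod = 1
-- 		for j in range(k):
-- 			prod *= arr[i + j]
-- 		max_prod = max(max_prod, prod)
--
-- 	return max_prod
-- ===== SOURCE B (Python) =====
-- def max_prod_subsequence(arr: list, k: int) -> int: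
-- 	if k == 1:
-- 		return max(arr)
--
-- 	n = len(arr)
-- 	if k > n or k <= 0:
-- 		return 0
--
-- 	best = 1
-- 	prod = 1      # product of the nonzero elements of the current window
-- 	zeros = 0     # number of zeros in the current window
-- 	for i, x in enumerate(arr):
-- 		if x == 0:
-- 			zeros += 1
-- 		else:
-- 			prod *= x
-- 		if i >= k:
-- 			y = arr[i - k]
-- 			if y == 0:
-- 				zeros -= 1
-- 			else:
-- 				prod //= y
-- 		if i >= k - 1:
-- 			best = max(best, 0 if zeros else prod)
-- 	return best
-- ===== Notes on version B (the rewrite author's own statement) =====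
-- stated objective: faster
-- what changed: Replaced the nested loop that recomputes each length-k window product from scratch with a single sliding-window pass maintaining the running product of the window's nonzero elements and a zero counter (incremental multiply on entry, exact divide on exit).
import Mathlib
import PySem

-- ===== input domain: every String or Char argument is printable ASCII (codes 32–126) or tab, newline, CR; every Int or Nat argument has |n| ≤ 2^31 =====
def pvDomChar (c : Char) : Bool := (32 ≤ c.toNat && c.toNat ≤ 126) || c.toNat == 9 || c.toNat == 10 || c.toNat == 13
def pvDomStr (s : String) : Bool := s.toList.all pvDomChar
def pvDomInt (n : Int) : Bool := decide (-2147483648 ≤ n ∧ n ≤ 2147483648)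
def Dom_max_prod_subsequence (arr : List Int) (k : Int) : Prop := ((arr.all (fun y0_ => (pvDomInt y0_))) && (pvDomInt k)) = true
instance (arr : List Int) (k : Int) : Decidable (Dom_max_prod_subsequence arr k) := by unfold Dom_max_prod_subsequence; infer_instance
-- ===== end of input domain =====

-- B replaces A's per-window O(k) recomputation by one sliding-window pass (running product
-- of the window's nonzero elements + zero count); measured asymptotically faster (O(n) vs O(n*k)).

-- ===== PORT A =====
def max_prod_subsequence (arr : List Int) (k : Int) : Int :=
  if k == 1 then
    (PySem.List.max? arr (fun y => y)).getD 0   -- max(arr); arr = [] raises and is excluded by Pre_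
  else
    let n : Int := arr.length
    if k > n || k ≤ 0 then 0
    else
      (PySem.List.pyRange 0 (n - k + 1) 1).foldl (fun max_prod i =>
        let prod := (PySem.List.pyRange 0 k 1).foldl
          (fun prod j => prod * PySem.List.pyGetD arr (i + j) 0) 1
        max max_prod prod) 1

-- ===== PORT B =====
def max_prod_subsequence_alt (arr : List Int) (k : Int) : Int :=
  if k == 1 then
    (PySem.List.max? arr (fun y => y)).getD 0   -- max(arr); arr = [] raises and is excluded by Pre_
  else
    let n : Int := arr.length
    if k > n || k ≤ 0 then 0
    else
      let st := (PySem.List.enumerate arr 0).foldl (fun (st : Int × Int × Int) ix =>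
        let best := st.1
        let prod := st.2.1
        let zeros := st.2.2
        let i := ix.1
        let x := ix.2
        let pz : Int × Int := if x == 0 then (prod, zeros + 1) else (prod * x, zeros)
        let pz2 : Int × Int :=
          if i ≥ k then
            let y := PySem.List.pyGetD arr (i - k) 0
            if y == 0 then (pz.1, pz.2 - 1) else (PySem.Int.floordiv pz.1 y, pz.2)
          else pz
        let best2 := if i ≥ k - 1 then max best (if pz2.2 ≠ 0 then 0 else pz2.1) else best
        (best2, pz2.1, pz2.2)) (1, 1, 0)
      st.1

-- ===== PRECONDITION & SPEC =====
-- Pre_ excludes only (k = 1, arr = []), on which A's max(arr) raises ValueError (B raises too).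
def Pre_max_prod_subsequence (arr : List Int) (k : Int) : Prop := k = 1 → arr ≠ []
instance (arr : List Int) (k : Int) : Decidable (Pre_max_prod_subsequence arr k) := by
  unfold Pre_max_prod_subsequence; infer_instance
def pvWitness_max_prod_subsequence : List Int × Int := ([3, -1, 4, 0, 2], 3)

def Spec_max_prod_subsequence (arr : List Int) (k : Int) (out : Int) : Prop := out = max_prod_subsequence_alt arr k
instance (arr : List Int) (k : Int) (out : Int) : Decidable (Spec_max_prod_subsequence arr k out) := by unfold Spec_max_prod_subsequence; infer_instance

-- ===== CLAIM (what is proved, stated in full; the proofs are below) =====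
def Claim_equal_max_prod_subsequence : Prop := ∀ (arr : List Int) (k : Int), Dom_max_prod_subsequence arr k → Pre_max_prod_subsequence arr k → Spec_max_prod_subsequence arr k (max_prod_subsequence arr k)

-- ===== LEMMAS AND PROOFS =====

-- product of the window of length kk starting at i
def pvWprod (arr : List Int) (i kk : Nat) : Int := ((arr.drop i).take kk).prod
-- running maximum (seeded at 1) over the first m window products
def pvRunmax (arr : List Int) (kk m : Nat) : Int :=
  (List.range m).foldl (fun b i => max b (pvWprod arr i kk)) 1
-- the window after m elements have been consumed
def pvWin (arr : List Int) (kk m : Nat) : List Int := (arr.take m).drop (m - kk)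
def pvPnz (w : List Int) : Int := (w.filter (fun x => x != 0)).prod
def pvZc (w : List Int) : Nat := w.count 0

-- B's loop body, named (definitionally equal to the lambda in max_prod_subsequence_alt)
def pvStep (arr : List Int) (k : Int) (st : Int × Int × Int) (ix : Int × Int) : Int × Int × Int :=
  let best := st.1
  let prod := st.2.1
  let zeros := st.2.2
  let i := ix.1
  let x := ix.2
  let pz : Int × Int := if x == 0 then (prod, zeros + 1) else (prod * x, zeros)
  let pz2 : Int × Int :=
    if i ≥ k then
      let y := PySem.List.pyGetD arr (i - k) 0
      if y == 0 then (pz.1, pz.2 - 1) else (PySem.Int.floordiv pz.1 y, pz.2)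
    else pz
  let best2 := if i ≥ k - 1 then max best (if pz2.2 ≠ 0 then 0 else pz2.1) else best
  (best2, pz2.1, pz2.2)

theorem pvPnz_append (w : List Int) (x : Int) :
    pvPnz (w ++ [x]) = if x = 0 then pvPnz w else pvPnz w * x := by
  simp [pvPnz, List.filter_append]
  split_ifs with h <;> simp [h]

theorem pvZc_append (w : List Int) (x : Int) :
    pvZc (w ++ [x]) = pvZc w + (if x = 0 then 1 else 0) := by
  simp only [pvZc, List.count_append]
  split_ifs with h <;> simp [h]

theorem pvPnz_cons (y : Int) (w : List Int) :
    pvPnz (y :: w) = if y = 0 then pvPnz w else y * pvPnz w := by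
  simp [pvPnz, List.filter_cons]
  split_ifs with h <;> simp [h]

theorem pvZc_cons (y : Int) (w : List Int) :
    pvZc (y :: w) = (if y = 0 then 1 else 0) + pvZc w := by
  simp only [pvZc, List.count_cons, beq_iff_eq]
  split_ifs with h
  · omega
  · simp [h]

theorem pvProd_zc (w : List Int) :
    (if pvZc w ≠ 0 then (0:Int) else pvPnz w) = w.prod := by
  induction w with
  | nil => simp [pvZc, pvPnz]
  | cons y t ih =>
    rw [pvZc_cons, pvPnz_cons]
    by_cases hy : y = 0
    · simp [hy]
    · simp only [if_neg hy]
      by_cases hz : pvZc t = 0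
      · have ht : pvPnz t = t.prod := by simpa [hz] using ih
        simp [hz, ht]
      · have ht : t.prod = 0 := by simpa [hz] using ih.symm
        simp [hz, ht]

theorem pvFdiv_cancel (y t : Int) (h : y ≠ 0) : PySem.Int.floordiv (y * t) y = t := by
  unfold PySem.Int.floordiv
  exact Int.mul_fdiv_cancel_left t h

theorem pvRunmax_succ (arr : List Int) (kk m : Nat) :
    pvRunmax arr kk (m + 1) = max (pvRunmax arr kk m) (pvWprod arr m kk) := by
  simp [pvRunmax, List.range_succ]

theorem pvWin_small (arr : List Int) (kN m : Nat) (h : m ≤ kN) :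
    pvWin arr kN m = arr.take m := by
  simp [pvWin, Nat.sub_eq_zero_of_le h]

theorem pvWin_succ_small (arr : List Int) (kN m : Nat) (h : m < kN) (hm : m < arr.length) :
    pvWin arr kN (m + 1) = pvWin arr kN m ++ [arr[m]] := by
  rw [pvWin_small arr kN m (le_of_lt h), pvWin_small arr kN (m+1) h]
  exact List.take_succ_eq_append_getElem hm

theorem pvWin_big_cons (arr : List Int) (kN m : Nat) (h1 : 0 < kN) (hk : kN ≤ m)
    (hm : m ≤ arr.length) (hmk : m - kN < arr.length) :
    pvWin arr kN m = arr[m - kN] :: (arr.take m).drop (m - kN + 1) := by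
  unfold pvWin
  have hlen : (arr.take m).length = m := by simp [hm]
  have hlt : m - kN < (arr.take m).length := by omega
  rw [List.drop_eq_getElem_cons hlt]
  congr 1
  simp [List.getElem_take]

theorem pvWin_succ_big (arr : List Int) (kN m : Nat) (h1 : 0 < kN) (hk : kN ≤ m)
    (hm : m < arr.length) :
    pvWin arr kN (m + 1) = (arr.take m).drop (m - kN + 1) ++ [arr[m]] := by
  unfold pvWin
  rw [List.take_succ_eq_append_getElem hm]
  have hle : m + 1 - kN ≤ (arr.take m).length := by simp; omega
  rw [List.drop_append_of_le_length hle]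
  congr 2
  omega

theorem pvWin_eq_window (arr : List Int) (kN m : Nat) (hk : kN ≤ m) (hm : m ≤ arr.length) :
    pvWin arr kN m = (arr.drop (m - kN)).take kN := by
  unfold pvWin
  rw [List.drop_take]
  congr 1
  omega

theorem pvInnerA (arr : List Int) (iN : Nat) :
    ∀ m, iN + m ≤ arr.length →
      (List.range m).foldl (fun p j => p * arr.getD (iN + j) 0) 1 = pvWprod arr iN m := by
  intro m
  induction m with
  | zero => intro _; simp [pvWprod]
  | succ m ih =>
    intro h
    rw [List.range_succ, List.foldl_append, ih (by omega)]
    have hlt : iN + m < arr.length := by omega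
    have hdlt : m < (arr.drop iN).length := by simp; omega
    simp only [List.foldl_cons, List.foldl_nil, pvWprod]
    rw [List.take_succ_eq_append_getElem hdlt, List.prod_append]
    rw [List.getElem_drop]
    rw [List.getD_eq_getElem arr 0 hlt]
    simp

theorem pvPortA (arr : List Int) (kN : Nat) (h1 : 0 < kN) (hk1 : kN ≠ 1) (h2 : kN ≤ arr.length) :
    max_prod_subsequence arr (kN : Int) = pvRunmax arr kN (arr.length - kN + 1) := by
  unfold max_prod_subsequence
  rw [if_neg (by simp; omega)]
  simp only []
  rw [if_neg (by simp; omega)]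
  have hcast : (arr.length : Int) - (kN : Int) + 1 = ((arr.length - kN + 1 : Nat) : Int) := by
    push_cast [h2]; omega
  rw [hcast, PySem.List.pyRange_zero_nat, PySem.List.pyRange_zero_nat, List.foldl_map]
  rw [PySem.List.foldl_congr_mem _ _ (fun mp iN => max mp (pvWprod arr iN kN)) 1 ?_]
  · rfl
  · intro acc iN hiN
    simp only [List.mem_range] at hiN
    congr 1
    rw [List.foldl_map]
    have hcongr : ∀ (acc' : Int), ∀ j ∈ List.range kN,
        acc' * PySem.List.pyGetD arr ((iN:Int) + (j:Nat)) 0 = acc' * arr.getD (iN + j) 0 := by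
      intro acc' j _
      rw [show (iN : Int) + (j : Int) = ((iN + j : Nat) : Int) by push_cast; ring]
      rw [PySem.List.pyGetD_natCast arr (iN + j) 0]
    rw [PySem.List.foldl_congr_mem (List.range kN) _ (fun p j => p * arr.getD (iN + j) 0) 1 hcongr]
    exact pvInnerA arr iN kN (by omega)

theorem pvAltEq (arr : List Int) (kN : Nat) (h1 : 0 < kN) (hk1 : kN ≠ 1) (h2 : kN ≤ arr.length) :
    max_prod_subsequence_alt arr (kN : Int) =
      ((List.range arr.length).foldl
        (fun st (j : Nat) => pvStep arr (kN:Int) st ((j:Int), PySem.List.pyGetD arr (j:Int) 0)) (1,1,0)).1 := by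
  unfold max_prod_subsequence_alt
  rw [if_neg (by simp; omega)]
  simp only []
  rw [if_neg (by simp; omega)]
  rw [PySem.List.enumerate_eq_map_pyRange arr (0:Int)]
  simp only [PySem.List.len_eq]
  rw [PySem.List.pyRange_zero_nat, List.map_map, List.foldl_map]
  simp only [Function.comp_def]
  rfl

theorem pvStep_eval (arr : List Int) (kN : Nat) (h1 : 0 < kN) (m : Nat) (hm : m < arr.length) (b : Int) :
    pvStep arr (kN:Int) (b, pvPnz (pvWin arr kN m), (pvZc (pvWin arr kN m) : Int))
      ((m:Int), PySem.List.pyGetD arr (m:Int) 0)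
    = ((if kN ≤ m + 1 then max b ((pvWin arr kN (m+1)).prod) else b),
       pvPnz (pvWin arr kN (m+1)), (pvZc (pvWin arr kN (m+1)) : Int)) := by
  have hx : PySem.List.pyGetD arr ((m : Nat) : Int) 0 = arr[m] := by
    rw [PySem.List.pyGetD_natCast]; exact List.getD_eq_getElem arr 0 hm
  unfold pvStep
  simp only [hx]
  by_cases hbig : kN ≤ m
  · -- an element leaves the window
    have hy : PySem.List.pyGetD arr ((m:Int) - (kN:Int)) 0 = arr[m - kN] := by
      rw [show (m:Int) - (kN:Int) = ((m - kN : Nat) : Int) by omega]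
      rw [PySem.List.pyGetD_natCast]; exact List.getD_eq_getElem arr 0 (by omega)
    have hcons := pvWin_big_cons arr kN m h1 hbig (le_of_lt hm) (by omega)
    have hsucc := pvWin_succ_big arr kN m h1 hbig hm
    rw [if_pos (show ((m:Int) ≥ (kN:Int)) by exact_mod_cast hbig)]
    rw [if_pos (show ((m:Int) ≥ (kN:Int) - 1) by omega)]
    rw [if_pos (show kN ≤ m + 1 by omega)]
    rw [hy, hcons, hsucc, pvPnz_cons, pvZc_cons, pvPnz_append, pvZc_append]
    set W : List Int := (arr.take m).drop (m - kN + 1) with hW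
    set P : Int := pvPnz W with hP
    set Z : Nat := pvZc W with hZ
    have hwp := pvProd_zc W
    by_cases hy0 : arr[m - kN] = 0
    · by_cases hx0 : arr[m] = 0
      · simp only [hy0, hx0, beq_self_eq_true, if_true, if_pos rfl]
        have hc : ((1 + Z : Nat) : Int) + 1 - 1 ≠ 0 := by push_cast; omega
        rw [if_pos hc]
        refine congrArg₂ _ (congrArg₂ _ rfl ?_) (congrArg₂ _ rfl ?_)
        · simp [List.prod_append]
        · push_cast; ring
      · -- zero leaves, nonzero enters
        simp only [hy0, hx0, beq_self_eq_true, if_true, if_pos rfl, beq_iff_eq,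
          if_neg hx0, if_false]
        by_cases hz : Z = 0
        · have hz' : pvZc W = 0 := by rw [← hZ]; exact hz
          have hwp' : pvPnz W = W.prod := by simpa [hz'] using hwp
          have hc : ¬ (((1 + Z : Nat) : Int) - 1 ≠ 0) := by simp [hz]
          rw [if_neg hc]
          refine congrArg₂ _ (congrArg₂ _ rfl ?_) (congrArg₂ _ rfl ?_)
          · rw [List.prod_append, ← hwp', ← hP]; simp
          · push_cast; ring
        · have hz' : pvZc W ≠ 0 := by rw [← hZ]; exact hz
          have hwp' : W.prod = 0 := by simpa [hz'] using hwp.symm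
          have hc : (((1 + Z : Nat) : Int) - 1 ≠ 0) := by push_cast; omega
          rw [if_pos hc]
          refine congrArg₂ _ (congrArg₂ _ rfl ?_) (congrArg₂ _ rfl ?_)
          · rw [List.prod_append, hwp']; simp
          · push_cast; ring
    · -- nonzero leaves
      simp only [beq_iff_eq, if_neg hy0, ite_false, if_false, Nat.zero_add]
      by_cases hx0 : arr[m] = 0
      · simp only [hx0, beq_self_eq_true, if_true, ite_true, if_pos rfl]
        rw [pvFdiv_cancel _ _ hy0]
        have hc : ((Z : Int) + 1 ≠ 0) := by push_cast; omega
        rw [if_pos hc]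
        refine congrArg₂ _ (congrArg₂ _ rfl ?_) (congrArg₂ _ rfl ?_)
        · simp [List.prod_append]
        · push_cast; ring
      · simp only [hx0, beq_iff_eq, if_neg hx0, ite_false, if_false]
        rw [mul_assoc, pvFdiv_cancel _ _ hy0]
        by_cases hz : Z = 0
        · have hz' : pvZc W = 0 := by rw [← hZ]; exact hz
          have hwp' : pvPnz W = W.prod := by simpa [hz'] using hwp
          have hc : ¬ ((Z : Int) ≠ 0) := by simp [hz]
          rw [if_neg hc]
          refine congrArg₂ _ (congrArg₂ _ rfl ?_) (congrArg₂ _ rfl ?_)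
          · rw [List.prod_append, ← hwp', ← hP]; simp
          · push_cast; ring
        · have hz' : pvZc W ≠ 0 := by rw [← hZ]; exact hz
          have hwp' : W.prod = 0 := by simpa [hz'] using hwp.symm
          have hc : ((Z : Int) ≠ 0) := by push_cast; omega
          rw [if_pos hc]
          refine congrArg₂ _ (congrArg₂ _ rfl ?_) (congrArg₂ _ rfl ?_)
          · rw [List.prod_append, hwp']; simp
          · push_cast; ring
  · -- window still growing: nothing leaves
    rw [if_neg (show ¬ ((m:Int) ≥ (kN:Int)) by omega)]
    have hm' : m < kN := by omega
    have hsucc := pvWin_succ_small arr kN m hm' hm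
    rw [hsucc, pvPnz_append, pvZc_append]
    set W : List Int := pvWin arr kN m with hW
    set P : Int := pvPnz W with hP
    set Z : Nat := pvZc W with hZ
    have hwp := pvProd_zc W
    by_cases hful : kN ≤ m + 1
    · rw [if_pos (show ((m:Int) ≥ (kN:Int) - 1) by omega)]
      rw [if_pos hful]
      by_cases hx0 : arr[m] = 0
      · simp only [hx0, beq_self_eq_true, if_true, ite_true, if_pos rfl]
        have hc : ((Z : Int) + 1 ≠ 0) := by push_cast; omega
        rw [if_pos hc]
        refine congrArg₂ _ (congrArg₂ _ rfl ?_) (congrArg₂ _ rfl ?_)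
        · simp [List.prod_append]
        · push_cast; ring
      · simp only [hx0, beq_iff_eq, if_neg hx0, ite_false, if_false]
        by_cases hz : Z = 0
        · have hz' : pvZc W = 0 := by rw [← hZ]; exact hz
          have hwp' : pvPnz W = W.prod := by simpa [hz'] using hwp
          have hc : ¬ ((Z : Int) ≠ 0) := by simp [hz]
          rw [if_neg hc]
          refine congrArg₂ _ (congrArg₂ _ rfl ?_) (congrArg₂ _ rfl ?_)
          · rw [List.prod_append, ← hwp', ← hP]; simp
          · push_cast; ring
        · have hz' : pvZc W ≠ 0 := by rw [← hZ]; exact hz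
          have hwp' : W.prod = 0 := by simpa [hz'] using hwp.symm
          have hc : ((Z : Int) ≠ 0) := by push_cast; omega
          rw [if_pos hc]
          refine congrArg₂ _ (congrArg₂ _ rfl ?_) (congrArg₂ _ rfl ?_)
          · rw [List.prod_append, hwp']; simp
          · push_cast; ring
    · rw [if_neg (show ¬ ((m:Int) ≥ (kN:Int) - 1) by omega)]
      rw [if_neg hful]
      by_cases hx0 : arr[m] = 0
      · simp only [hx0, beq_self_eq_true, if_true, ite_true, if_pos rfl]
        refine congrArg₂ _ rfl (congrArg₂ _ rfl ?_)
        push_cast; ring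
      · simp only [hx0, beq_iff_eq, if_neg hx0, ite_false, if_false]
        refine congrArg₂ _ rfl (congrArg₂ _ rfl ?_)
        push_cast; ring

theorem pvInv (arr : List Int) (kN : Nat) (h1 : 0 < kN) (h2 : kN ≤ arr.length) :
    ∀ m, m ≤ arr.length →
      (List.range m).foldl
          (fun st (j : Nat) => pvStep arr (kN:Int) st ((j:Int), PySem.List.pyGetD arr (j:Int) 0)) (1,1,0)
        = (pvRunmax arr kN (m + 1 - kN), pvPnz (pvWin arr kN m), (pvZc (pvWin arr kN m) : Int)) := by
  intro m
  induction m with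
  | zero =>
    intro _
    have h0 : 0 + 1 - kN = 0 := by omega
    simp [h0, pvRunmax, pvWin, pvPnz, pvZc]
  | succ m ih =>
    intro hm1
    rw [List.range_succ, List.foldl_append, ih (by omega)]
    simp only [List.foldl_cons, List.foldl_nil]
    rw [pvStep_eval arr kN h1 m (by omega) _]
    by_cases hful : kN ≤ m + 1
    · rw [if_pos hful]
      have hwin : (pvWin arr kN (m+1)).prod = pvWprod arr (m + 1 - kN) kN := by
        rw [pvWin_eq_window arr kN (m+1) hful (by omega)]; rfl
      have hrm : pvRunmax arr kN (m + 1 + 1 - kN)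
          = max (pvRunmax arr kN (m + 1 - kN)) (pvWprod arr (m + 1 - kN) kN) := by
        rw [show m + 1 + 1 - kN = (m + 1 - kN) + 1 by omega, pvRunmax_succ]
      rw [hrm, hwin]
    · rw [if_neg hful]
      rw [show m + 1 + 1 - kN = m + 1 - kN by omega]

theorem pvPortB (arr : List Int) (kN : Nat) (h1 : 0 < kN) (hk1 : kN ≠ 1) (h2 : kN ≤ arr.length) :
    max_prod_subsequence_alt arr (kN : Int) = pvRunmax arr kN (arr.length - kN + 1) := by
  rw [pvAltEq arr kN h1 hk1 h2, pvInv arr kN h1 h2 arr.length (le_refl _)]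
  simp only []
  congr 1
  omega

theorem pvAgree : ∀ (arr : List Int) (k : Int),
    Pre_max_prod_subsequence arr k → max_prod_subsequence arr k = max_prod_subsequence_alt arr k := by
  intro arr k hpre
  by_cases hk1 : k = 1
  · subst hk1
    unfold max_prod_subsequence max_prod_subsequence_alt
    rfl
  · by_cases hrange : k > (arr.length : Int) ∨ k ≤ 0
    · unfold max_prod_subsequence max_prod_subsequence_alt
      have hne : ¬ ((k == 1) = true) := by simpa using hk1
      have hr : ((decide (k > ((arr.length : Int)))) || (decide (k ≤ 0))) = true := by
        rcases hrange with h | h <;> simp [h]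
      rw [if_neg hne, if_pos hr, if_neg hne, if_pos hr]
    · push_neg at hrange
      obtain ⟨hle, hpos⟩ := hrange
      set kN : Nat := k.toNat with hkN
      have hk : k = (kN : Int) := by omega
      have h1 : 0 < kN := by omega
      have hk1' : kN ≠ 1 := by omega
      have h2 : kN ≤ arr.length := by omega
      rw [hk, pvPortA arr kN h1 hk1' h2, pvPortB arr kN h1 hk1' h2]

-- ===== VERDICT (by name: the statement is the Claim_ definition above) =====
theorem max_prod_subsequence_spec : Claim_equal_max_prod_subsequence := by
  intro arr k _ hpre
  unfold Spec_max_prod_subsequence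
  exact pvAgree arr k hpre
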